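-- pv_equiv track=rewrite | github.com/mosadd1X/novelforge-ai | src/scripts/test_all_38_genres.py | should_generate_characters
-- ===== SOURCE A (Python) =====
-- def should_generate_characters(genre: str) -> bool:
--     """Copy of the function from main.py for testing all 38 genres."""
--     fiction_genres = [
--         "literary fiction", "commercial fiction", "mystery", "mystery thriller",
--         "thriller", "romance", "fantasy", "epic fantasy", "science fiction",
--         "historical fiction", "horror", "young adult", "middle grade",
--         "children's chapter books", "speculative fiction", "alternate history",
--         "contemporary fiction", "paranormal romance", "urban fantasy", "dystopian",
--         "test"
--     ]
--
--     genre_normalized = genre.lower().strip()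
--
--     # First check for exact matches
--     for fiction_genre in fiction_genres:
--         if fiction_genre.lower() == genre_normalized:
--             return True
--
--     # Then check for partial matches, but be very careful
--     for fiction_genre in fiction_genres:
--         # Only allow partial matches if the genre is clearly contained
--         if genre_normalized in fiction_genre.lower() and len(genre_normalized) > 3:
--             # Avoid false positives like "history" matching fiction genres
--             if genre_normalized == "history" and ("historical" in fiction_genre.lower() or "alternate" in fiction_genre.lower()):
--                 continue
--             if genre_normalized == "science" and "science fiction" in fiction_genre.lower():
--                 continue
--             return True
--
--     return False
-- ===== SOURCE B (Python) =====
-- FICTION_GENRES = [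
--     "literary fiction", "commercial fiction", "mystery", "mystery thriller",
--     "thriller", "romance", "fantasy", "epic fantasy", "science fiction",
--     "historical fiction", "horror", "young adult", "middle grade",
--     "children's chapter books", "speculative fiction", "alternate history",
--     "contemporary fiction", "paranormal romance", "urban fantasy", "dystopian",
--     "test"
-- ]
--
-- def should_generate_characters(genre: str) -> bool:
--     g = genre.lower().strip()
--     if len(g) <= 3 or g in ("history", "science"):
--         return False
--     return any(g in fg for fg in FICTION_GENRES)
-- ===== Notes on version B (the rewrite author's own statement) =====
-- stated objective: simpler
-- what changed: B collapses A's two sequential scans (an exact-match pass, then a guarded partial-containment pass) into an early rejection of short strings and the two excluded words 'history'/'science' followed by a single substring scan; every exact match is also a substring match of length > 3, and the only genres containing 'history'/'science' are exactly the ones A's continue-guards skip, so the values coincide.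
import Mathlib
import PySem

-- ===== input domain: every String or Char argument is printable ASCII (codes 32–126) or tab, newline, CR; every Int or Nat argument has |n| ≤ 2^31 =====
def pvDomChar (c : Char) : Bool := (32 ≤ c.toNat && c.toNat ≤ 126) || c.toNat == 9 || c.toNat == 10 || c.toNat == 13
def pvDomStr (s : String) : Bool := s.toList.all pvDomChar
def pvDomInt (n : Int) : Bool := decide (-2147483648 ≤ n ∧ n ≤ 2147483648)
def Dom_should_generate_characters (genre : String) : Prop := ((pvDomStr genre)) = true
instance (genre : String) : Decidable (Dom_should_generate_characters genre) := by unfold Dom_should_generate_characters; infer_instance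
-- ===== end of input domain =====

-- B replaces A's two sequential scans (exact pass, then guarded partial pass) by an early rejection
-- of short / excluded inputs followed by a single substring scan; objective: simpler, same value everywhere.

-- the genre list (the same literal list in both Python versions: local in A, a module constant in B)
def fictionGenres : List String := [
  "literary fiction", "commercial fiction", "mystery", "mystery thriller",
  "thriller", "romance", "fantasy", "epic fantasy", "science fiction",
  "historical fiction", "horror", "young adult", "middle grade",
  "children's chapter books", "speculative fiction", "alternate history",
  "contemporary fiction", "paranormal romance", "urban fantasy", "dystopian",
  "test"]

-- ===== PORT A =====
def should_generate_characters (genre : String) : Bool :=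
  let g := PySem.Str.strip (PySem.Str.lower genre)
  -- first loop: exact matches ('return True' stops the scan = List.any)
  if fictionGenres.any (fun fg => PySem.Str.lower fg == g) then true
  else
    -- second loop: partial matches; 'continue' = this element's condition is false
    fictionGenres.any (fun fg =>
      PySem.Str.isIn g (PySem.Str.lower fg) && decide (3 < PySem.Str.len g) &&
      !(g == "history" && (PySem.Str.isIn "historical" (PySem.Str.lower fg) ||
                           PySem.Str.isIn "alternate" (PySem.Str.lower fg))) &&
      !(g == "science" && PySem.Str.isIn "science fiction" (PySem.Str.lower fg)))

-- ===== PORT B =====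
def should_generate_characters_alt (genre : String) : Bool :=
  let g := PySem.Str.strip (PySem.Str.lower genre)
  if decide (PySem.Str.len g ≤ 3) || g == "history" || g == "science" then false
  else fictionGenres.any (fun fg => PySem.Str.isIn g fg)

-- ===== PRECONDITION & SPEC =====
def Spec_should_generate_characters (genre : String) (out : Bool) : Prop := out = should_generate_characters_alt genre
instance (genre : String) (out : Bool) : Decidable (Spec_should_generate_characters genre out) := by unfold Spec_should_generate_characters; infer_instance

-- ===== CLAIM (what is proved, stated in full; the proofs are below) =====
def Claim_equal_should_generate_characters : Prop := ∀ (genre : String), Dom_should_generate_characters genre → Spec_should_generate_characters genre (should_generate_characters genre)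

-- ===== LEMMAS AND PROOFS =====

-- lowering the constant list is the identity (every listed genre is already lower-case)
theorem map_lower_fictionGenres : fictionGenres.map PySem.Str.lower = fictionGenres := by decide

-- a constant conjunct factors out of List.any
theorem any_and_const {α : Type} (l : List α) (p : α → Bool) (b : Bool) :
    (l.any fun x => p x && b) = (l.any p && b) := by
  induction l with
  | nil => simp
  | cons x xs ih => simp [List.any_cons, ih]; cases p x <;> cases b <;> simp

-- the core fact, for an arbitrary (already normalized) string g
theorem core (g : String) :
    (if fictionGenres.any (fun fg => PySem.Str.lower fg == g) then true
     else fictionGenres.any (fun fg =>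
       PySem.Str.isIn g (PySem.Str.lower fg) && decide (3 < PySem.Str.len g) &&
       !(g == "history" && (PySem.Str.isIn "historical" (PySem.Str.lower fg) ||
                            PySem.Str.isIn "alternate" (PySem.Str.lower fg))) &&
       !(g == "science" && PySem.Str.isIn "science fiction" (PySem.Str.lower fg))))
    = (if decide (PySem.Str.len g ≤ 3) || g == "history" || g == "science" then false
       else fictionGenres.any (fun fg => PySem.Str.isIn g fg)) := by
  by_cases hh : g = "history"
  · subst hh; decide
  by_cases hs : g = "science"
  · subst hs; decide
  have hhb : (g == "history") = false := beq_eq_false_iff_ne.mpr hh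
  have hsb : (g == "science") = false := beq_eq_false_iff_ne.mpr hs
  by_cases hg : g ∈ fictionGenres
  · -- g is itself one of the genres: both sides are true
    have hlen3 : 3 < PySem.Str.len g := by
      have h : ∀ x ∈ fictionGenres, 3 < PySem.Str.len x := by decide
      exact h g hg
    have hex : fictionGenres.any (fun fg => PySem.Str.lower fg == g) = true := by
      rw [show (fun fg => PySem.Str.lower fg == g) = ((· == g) ∘ PySem.Str.lower) from rfl,
          ← List.any_map, map_lower_fictionGenres]
      exact List.any_eq_true.mpr ⟨g, hg, beq_self_eq_true g⟩
    have hsub : fictionGenres.any (fun fg => PySem.Str.isIn g fg) = true :=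
      List.any_eq_true.mpr ⟨g, hg, (PySem.Str.isIn_iff_infix g g).mpr (List.infix_refl _)⟩
    have hlen' : 3 < g.length := by simpa using hlen3
    simp only [hex]
    rw [if_pos trivial, if_neg (by simp [hhb, hsb]; omega)]
    exact hsub.symm
  · -- g is none of the listed literals: the exact pass finds nothing,
    -- the guards never fire, and the two partial conditions coincide
    have hexact : fictionGenres.any (fun fg => PySem.Str.lower fg == g) = false := by
      rw [show (fun fg => PySem.Str.lower fg == g) = ((· == g) ∘ PySem.Str.lower) from rfl,
          ← List.any_map, map_lower_fictionGenres]
      rw [List.any_eq_false]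
      intro fg hfg hbeq
      simp only [beq_iff_eq] at hbeq
      exact hg (hbeq ▸ hfg)
    rw [hexact]
    simp only [Bool.false_eq_true, if_false, hhb, hsb, Bool.false_and, Bool.not_false,
      Bool.and_true, Bool.or_false]
    rw [show (fun fg => PySem.Str.isIn g (PySem.Str.lower fg) && decide (3 < PySem.Str.len g))
          = ((fun fg => PySem.Str.isIn g fg && decide (3 < PySem.Str.len g)) ∘ PySem.Str.lower) from rfl,
        ← List.any_map, map_lower_fictionGenres, any_and_const]
    by_cases hl : 3 < PySem.Str.len g
    · have hl' : 3 < g.length := by simpa using hl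
      rw [if_neg (by simp; omega)]
      simp only [decide_eq_true hl, Bool.and_true]
    · have hl' : ¬ 3 < g.length := by simpa using hl
      rw [if_pos (by simp; omega)]
      simp only [decide_eq_false hl, Bool.and_false]

-- ===== VERDICT (by name: the statement is the Claim_ definition above) =====
theorem should_generate_characters_spec : Claim_equal_should_generate_characters := by
  intro genre _
  unfold Spec_should_generate_characters should_generate_characters should_generate_characters_alt
  exact core (PySem.Str.strip (PySem.Str.lower genre))
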